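-- pv_equiv track=rewrite | github.com/guibrandao/SAT-solver-python | CNF_Tseytin_Transformer.py | verificarParentesesInicial
-- ===== SOURCE A (Python) =====
-- def verificarParentesesInicial(formula):
--     contadorParenteses = 0
--     if formula[:2] == '!(':
--         formula = formula[1:]
--     if formula[0] == '(':
--         for index, simbolo in enumerate(formula):
--             if(simbolo == '('):
--                 contadorParenteses += 1
--             elif(simbolo == ')'):
--                 contadorParenteses -= 1
--             if (contadorParenteses == 0 and index != len(formula)-1):
--                 return False
--         return True
--     else:
--         return False
-- ===== SOURCE B (Python) =====
-- def verificarParentesesInicial(formula):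
--     if formula[:2] == '!(':
--         formula = formula[1:]
--     if formula[0] != '(':
--         return False
--     # Build the full paren-matching map with a stack of open positions,
--     # then answer with one lookup: the '(' at position 0 must close at the
--     # last position (or never close at all).
--     pairs = {}
--     stack = []
--     for i, c in enumerate(formula):
--         if c == '(':
--             stack.append(i)
--         elif c == ')' and stack:
--             pairs[stack.pop()] = i
--     return pairs.get(0, len(formula) - 1) == len(formula) - 1
-- ===== Notes on version B (the rewrite author's own statement) =====
-- stated objective: alternative
-- what changed: A's single running-counter loop with early exit is replaced by the classic stack-of-positions parenthesis-matching pass that builds the full match map, after which the answer is one dictionary lookup: the '(' at position 0 must match the last position or be unmatched.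
import Mathlib
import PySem

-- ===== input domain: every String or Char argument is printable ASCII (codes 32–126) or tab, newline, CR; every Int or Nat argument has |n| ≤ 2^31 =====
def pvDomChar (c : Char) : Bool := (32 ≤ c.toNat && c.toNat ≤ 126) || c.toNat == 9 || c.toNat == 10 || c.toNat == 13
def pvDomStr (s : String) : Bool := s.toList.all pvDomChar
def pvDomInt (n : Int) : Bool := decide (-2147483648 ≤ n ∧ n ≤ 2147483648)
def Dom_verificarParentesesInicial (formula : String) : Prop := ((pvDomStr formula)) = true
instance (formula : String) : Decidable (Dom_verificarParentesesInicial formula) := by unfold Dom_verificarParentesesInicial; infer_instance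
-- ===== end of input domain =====

-- B replaces A's running-counter loop (early exit on an interior zero) by the classic
-- stack-of-positions parenthesis matcher: one pass builds the full match dictionary,
-- one lookup decides (objective: alternative algorithm; same cost).

-- ===== PORT A =====
-- A's loop over enumerate(formula): update the counter, return False on an interior zero.
def verifLoopA (n : Int) : List (Int × Char) → Int → Bool
  | [], _ => true
  | (i, x) :: ps, cnt =>
    let cnt' := if x = '(' then cnt + 1 else if x = ')' then cnt - 1 else cnt
    if cnt' = 0 ∧ i ≠ n - 1 then false else verifLoopA n ps cnt'

def verificarParentesesInicial (formula : String) : Bool :=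
  let l := formula.toList
  let l := if PySem.List.slice l none (some 2) = ['!', '('] then PySem.List.slice l (some 1) none else l
  match PySem.List.pyGet? l 0 with
  | none => false      -- Python raises IndexError here; excluded by Pre_
  | some c => if c = '(' then verifLoopA (PySem.List.len l) (PySem.List.enumerate l 0) 0 else false

-- ===== PORT B =====
-- B's loop body: push an open position; on ')' with a non-empty stack pop it and
-- record the match in the dict (stack.pop() = getLast of the list, guarded nonempty).
def verifStepB (st : PySem.Dict Int Int × List Int) (p : Int × Char) : PySem.Dict Int Int × List Int :=
  if p.2 = '(' then (st.1, st.2 ++ [p.1])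
  else if h : p.2 = ')' ∧ st.2 ≠ [] then
    (st.1.insert (st.2.getLast h.2) p.1, st.2.dropLast)
  else st

def verificarParentesesInicial_alt (formula : String) : Bool :=
  let l := formula.toList
  let l := if PySem.List.slice l none (some 2) = ['!', '('] then PySem.List.slice l (some 1) none else l
  match PySem.List.pyGet? l 0 with
  | none => false      -- Python raises IndexError here; excluded by Pre_
  | some c =>
    if c ≠ '(' then false
    else
      let st := (PySem.List.enumerate l 0).foldl verifStepB (PySem.Dict.empty, [])
      (st.1.getD 0 (PySem.List.len l - 1)) == PySem.List.len l - 1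

-- ===== PRECONDITION & SPEC =====
-- Pre_ excludes only the empty string, on which A raises IndexError (formula[0]).
def Pre_verificarParentesesInicial (formula : String) : Prop := formula ≠ ""
instance (formula : String) : Decidable (Pre_verificarParentesesInicial formula) := by unfold Pre_verificarParentesesInicial; infer_instance
def pvWitness_verificarParentesesInicial : String := "(p|q)"

def Spec_verificarParentesesInicial (formula : String) (out : Bool) : Prop := out = verificarParentesesInicial_alt formula
instance (formula : String) (out : Bool) : Decidable (Spec_verificarParentesesInicial formula out) := by unfold Spec_verificarParentesesInicial; infer_instance

-- ===== CLAIM (what is proved, stated in full; the proofs are below) =====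
def Claim_equal_verificarParentesesInicial : Prop := ∀ (formula : String), Dom_verificarParentesesInicial formula → Pre_verificarParentesesInicial formula → Spec_verificarParentesesInicial formula (verificarParentesesInicial formula)

-- ===== LEMMAS AND PROOFS =====

/-- Index of the ')' closing the group currently open, given the stack `s` of the
    positions opened strictly inside it (A's counter there is `s.length + 1`). -/
def firstClose : List (Int × Char) → List Int → Option Int
  | [], _ => none
  | (i, x) :: ps, s =>
    if x = '(' then firstClose ps (s ++ [i])
    else if x = ')' then
      match s with
      | [] => some i
      | _ :: _ => firstClose ps s.dropLast
    else firstClose ps s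

lemma firstClose_cons (i : Int) (x : Char) (ps : List (Int × Char)) (s : List Int) :
    firstClose ((i, x) :: ps) s
      = if x = '(' then firstClose ps (s ++ [i])
        else if x = ')' then
          (match s with
           | [] => some i
           | _ :: _ => firstClose ps s.dropLast)
        else firstClose ps s := rfl

lemma verifLoopA_cons (n i : Int) (x : Char) (ps : List (Int × Char)) (cnt : Int) :
    verifLoopA n ((i, x) :: ps) cnt
      = (let cnt' := if x = '(' then cnt + 1 else if x = ')' then cnt - 1 else cnt
         if cnt' = 0 ∧ i ≠ n - 1 then false else verifLoopA n ps cnt') := rfl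

/-- A's counter loop decides whether the first close lands on the last index. -/
lemma loopA_eq_firstClose (ps : List (Int × Char)) : ∀ (s : List Int) (n : Int),
    ps.Pairwise (fun p q => p.1 < q.1) → (∀ p ∈ ps, p.1 ≤ n - 1) →
    verifLoopA n ps ((s.length : Int) + 1)
      = (match firstClose ps s with | none => true | some j => decide (j = n - 1)) := by
  induction ps with
  | nil => intro s n _ _; simp [verifLoopA, firstClose]
  | cons p ps ih =>
    obtain ⟨i, x⟩ := p
    intro s n hpw hbd
    have hpw' := (List.pairwise_cons.mp hpw).2
    have hbd' : ∀ p ∈ ps, p.1 ≤ n - 1 := fun q hq => hbd q (List.mem_cons_of_mem _ hq)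
    rw [verifLoopA_cons, firstClose_cons]
    by_cases h1 : x = '('
    · rw [if_pos h1]
      simp only [h1]
      rw [if_neg (by rintro ⟨ha, hb⟩; omega)]
      have : (s.length : Int) + 1 + 1 = (((s ++ [i]).length : Int) + 1) := by simp
      rw [this]
      exact ih (s ++ [i]) n hpw' hbd'
    · by_cases h2 : x = ')'
      · rw [if_neg h1, if_pos h2]
        simp only [h2]
        cases s with
        | nil =>
          simp only [List.length_nil, Int.natCast_zero]
          by_cases hi : i = n - 1
          · have hps : ps = [] := by
              cases ps with
              | nil => rfl
              | cons q qs =>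
                exfalso
                have hlt : i < q.1 := (List.pairwise_cons.mp hpw).1 q List.mem_cons_self
                have hle : q.1 ≤ n - 1 := hbd' q List.mem_cons_self
                omega
            rw [if_neg (by simp [hi])]
            simp [hps, verifLoopA, hi]
          · rw [if_pos (by constructor <;> omega)]
            simp [hi]
        | cons y ys =>
          rw [if_neg (by rintro ⟨ha, hb⟩; simp at ha; omega)]
          have : (((y :: ys).length : Int) + 1 - 1) = ((y :: ys).dropLast.length : Int) + 1 := by
            simp
          rw [this]
          exact ih (y :: ys).dropLast n hpw' hbd'
      · rw [if_neg h1, if_neg h2]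
        simp only [h1, h2]
        rw [if_neg (by rintro ⟨ha, hb⟩; omega)]
        exact ih s n hpw' hbd'

/-- Once position 0 is off the stack, its entry in the dict never changes. -/
lemma closedPhase (ps : List (Int × Char)) : ∀ (d : PySem.Dict Int Int) (s : List Int),
    (∀ p ∈ ps, p.1 ≠ 0) → (∀ k ∈ s, k ≠ 0) →
    (ps.foldl verifStepB (d, s)).1.get? 0 = d.get? 0 := by
  induction ps with
  | nil => intro d s _ _; rfl
  | cons p ps ih =>
    intro d s h0 hs
    have h0' : ∀ q ∈ ps, q.1 ≠ 0 := fun q hq => h0 q (List.mem_cons_of_mem _ hq)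
    rw [List.foldl_cons]
    by_cases h1 : p.2 = '('
    · rw [verifStepB, if_pos h1]
      rw [ih _ _ h0']
      intro k hk
      rcases List.mem_append.mp hk with hk | hk
      · exact hs k hk
      · simp at hk; subst hk; exact h0 p List.mem_cons_self
    · by_cases h2 : p.2 = ')' ∧ s ≠ []
      · rw [verifStepB, if_neg h1, dif_pos h2]
        rw [ih _ _ h0' (fun k hk => hs k ((List.dropLast_sublist s).subset hk))]
        exact PySem.Dict.get?_insert_of_ne _ _
          (fun h => (hs _ (List.getLast_mem h2.2)) h.symm)
      · rw [verifStepB, if_neg h1, dif_neg h2]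
        exact ih d s h0' hs

/-- While position 0 sits at the bottom of the stack, the final dict entry at 0
    is exactly the first close of the outer group. -/
lemma openPhase (ps : List (Int × Char)) : ∀ (d : PySem.Dict Int Int) (s : List Int),
    (∀ p ∈ ps, p.1 ≠ 0) → (∀ k ∈ s, k ≠ 0) → d.get? 0 = none →
    (ps.foldl verifStepB (d, 0 :: s)).1.get? 0 = firstClose ps s := by
  induction ps with
  | nil => intro d s _ _ hd; simpa [firstClose] using hd
  | cons p ps ih =>
    obtain ⟨i, x⟩ := p
    intro d s h0 hs hd
    have h0' : ∀ q ∈ ps, q.1 ≠ 0 := fun q hq => h0 q (List.mem_cons_of_mem _ hq)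
    rw [List.foldl_cons, firstClose_cons]
    by_cases h1 : x = '('
    · have hstep : verifStepB (d, 0 :: s) (i, x) = (d, 0 :: (s ++ [i])) := by
        simp [verifStepB, h1]
      rw [hstep, if_pos h1]
      refine ih _ _ h0' ?_ hd
      intro k hk
      rcases List.mem_append.mp hk with hk | hk
      · exact hs k hk
      · simp at hk; subst hk; exact h0 _ List.mem_cons_self
    · by_cases h2 : x = ')'
      · rw [if_neg h1, if_pos h2]
        cases s with
        | nil =>
          have hstep : verifStepB (d, [0]) (i, x) = (d.insert 0 i, []) := by
            simp [verifStepB, h2]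
          rw [hstep]
          rw [closedPhase ps _ [] h0' (by simp)]
          exact PySem.Dict.get?_insert_self _ _ _
        | cons y ys =>
          have hne : y :: ys ≠ [] := by simp
          have hstep : verifStepB (d, 0 :: y :: ys) (i, x)
              = (d.insert ((y :: ys).getLast hne) i, 0 :: (y :: ys).dropLast) := by
            rw [verifStepB, if_neg h1, dif_pos ⟨h2, by simp⟩]
            rw [List.getLast_cons hne, List.dropLast_cons_of_ne_nil hne]
          rw [hstep]
          refine ih _ _ h0' (fun k hk => hs k ((List.dropLast_sublist _).subset hk)) ?_
          rw [PySem.Dict.get?_insert_of_ne _ _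
            (fun h => (hs _ (List.getLast_mem hne)) h.symm)]
          exact hd
      · have hstep : verifStepB (d, 0 :: s) (i, x) = (d, 0 :: s) := by
          simp [verifStepB, h1, h2]
        rw [hstep, if_neg h1, if_neg h2]
        exact ih d s h0' hs hd

-- ===== VERDICT (by name: the statement is the Claim_ definition above) =====
theorem verificarParentesesInicial_spec : Claim_equal_verificarParentesesInicial := by
  intro formula _ _
  unfold Spec_verificarParentesesInicial verificarParentesesInicial verificarParentesesInicial_alt
  have h2 : PySem.List.slice formula.toList none (some 2) = formula.toList.take 2 := by
    have := PySem.List.slice_to_natCast (xs := formula.toList) (b := 2)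
    simpa using this
  have h1 : PySem.List.slice formula.toList (some 1) none = formula.toList.drop 1 := by
    have := PySem.List.slice_from_natCast (xs := formula.toList) (a := 1)
    simpa using this
  simp only [h2, h1]
  set l := if formula.toList.take 2 = ['!', '('] then formula.toList.drop 1 else formula.toList with hl
  cases hc : l with
  | nil => simp [PySem.List.pyGet?, PySem.List.pyIdx?]
  | cons c rest =>
    rw [PySem.List.pyGet?_zero_cons]
    by_cases hpar : c = '('
    · simp only [hpar, ne_eq, not_true_eq_false, if_false, if_true]
      subst hpar
      -- A side: peel the first step of the loop, then the counter/firstClose bridge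
      have hA : verifLoopA (PySem.List.len ('(' :: rest)) (PySem.List.enumerate ('(' :: rest) 0) 0
          = (match firstClose (PySem.List.enumerate rest 1) [] with
             | none => true
             | some j => decide (j = PySem.List.len ('(' :: rest) - 1)) := by
        have hbd : ∀ p ∈ PySem.List.enumerate rest 1, p.1 ≤ PySem.List.len ('(' :: rest) - 1 := by
          intro p hp
          obtain ⟨k, hk, rfl⟩ := (PySem.List.mem_enumerate_iff _ _ _).mp hp
          simp [PySem.List.len_eq]
          omega
        have hbr := loopA_eq_firstClose (PySem.List.enumerate rest 1) []
          (PySem.List.len ('(' :: rest)) (PySem.List.pairwise_lt_enumerate _ _) hbd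
        rw [PySem.List.enumerate_cons, verifLoopA_cons]
        norm_num
        simpa using hbr
      -- B side: the first step pushes 0; then the open-phase invariant applies
      have hB : ((PySem.List.enumerate ('(' :: rest) 0).foldl verifStepB (PySem.Dict.empty, [])).1.get? 0
          = firstClose (PySem.List.enumerate rest 1) [] := by
        rw [PySem.List.enumerate_cons, List.foldl_cons]
        have hstep : verifStepB (PySem.Dict.empty, []) ((0 : Int), '(') = (PySem.Dict.empty, 0 :: ([] : List Int)) := by
          simp [verifStepB]
        rw [hstep]
        have hz : ∀ q ∈ PySem.List.enumerate rest (0 + 1), q.1 ≠ 0 := by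
          intro p hp
          obtain ⟨k, hk, rfl⟩ := (PySem.List.mem_enumerate_iff _ _ _).mp hp
          simp
          omega
        rw [openPhase _ _ _ hz (by simp) (PySem.Dict.get?_empty _)]
        norm_num
      rw [hA, PySem.Dict.getD_eq_get?_getD, hB]
      cases firstClose (PySem.List.enumerate rest 1) [] with
      | none => simp
      | some j => by_cases hj : j = (rest.length : Int) <;> simp [hj]
    · simp [hpar]
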